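-- pv_equiv track=rewrite | github.com/asimog/cancerhawk | backend/shared/lean4_client.py | _deduplicate_leading_import
-- ===== SOURCE A (Python) =====
-- def _deduplicate_leading_import(code: str) -> str:
--     """Collapse repeated ``import Mathlib`` prefixes the model sometimes emits."""
--     if not code:
--         return code
--     lines = code.splitlines()
--     kept: list[str] = []
--     seen_imports: set[str] = set()
--     past_imports = False
--     for line in lines:
--         stripped = line.strip()
--         if stripped.startswith("import "):
--             if past_imports:
--                 kept.append(line)
--                 continue
--             if stripped in seen_imports:
--                 continue
--             seen_imports.add(stripped)
--             kept.append(line)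
--         else:
--             if stripped:
--                 past_imports = True
--             kept.append(line)
--     return "\n".join(kept)
-- ===== SOURCE B (Python) =====
-- def _deduplicate_leading_import(code: str) -> str:
--     """Collapse repeated import lines in the leading import block (two-phase)."""
--     if not code:
--         return code
--     lines = code.splitlines()
--     # Phase 1: boundary = index of first line that is non-blank and not an import.
--     boundary = len(lines)
--     for i, line in enumerate(lines):
--         s = line.strip()
--         if s and not s.startswith("import "):
--             boundary = i
--             break
--     # Phase 2: deduplicate only the leading block; the rest is kept verbatim.
--     out = []
--     seen = set()
--     for line in lines[:boundary]:
--         s = line.strip()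
--         if s.startswith("import "):
--             if s in seen:
--                 continue
--             seen.add(s)
--         out.append(line)
--     return "\n".join(out + lines[boundary:])
-- ===== Notes on version B (the rewrite author's own statement) =====
-- stated objective: alternative
-- what changed: Replaces the single pass with a past_imports flag by a two-phase decomposition: first find the boundary index of the leading import/blank block, then deduplicate only that prefix and concatenate the rest verbatim.
import Mathlib
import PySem

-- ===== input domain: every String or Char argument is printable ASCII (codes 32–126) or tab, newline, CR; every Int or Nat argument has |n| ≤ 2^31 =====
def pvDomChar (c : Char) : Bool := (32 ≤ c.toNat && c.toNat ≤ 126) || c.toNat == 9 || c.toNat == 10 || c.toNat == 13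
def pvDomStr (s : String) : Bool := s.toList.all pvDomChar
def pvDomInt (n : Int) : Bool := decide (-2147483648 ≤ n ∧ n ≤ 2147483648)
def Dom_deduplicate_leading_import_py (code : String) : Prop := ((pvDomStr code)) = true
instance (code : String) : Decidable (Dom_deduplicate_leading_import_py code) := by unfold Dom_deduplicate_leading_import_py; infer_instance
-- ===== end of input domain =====

-- B replaces A's one-pass flagged loop by a two-phase decomposition (find the boundary of the
-- leading import/blank block, then deduplicate only that prefix); same cost, no speed claim.


-- ===== PORT A =====
def pvStepA (st : List String × PySem.Set String × Bool) (line : String) :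
    List String × PySem.Set String × Bool :=
  let kept := st.1
  let seen := st.2.1
  let past := st.2.2
  let stripped := PySem.Str.strip line
  if PySem.Str.startswith stripped "import " then
    if past then (kept ++ [line], seen, past)
    else if PySem.Set.contains seen stripped then (kept, seen, past)
    else (kept ++ [line], PySem.Set.add seen stripped, past)
  else
    (kept ++ [line], seen, if stripped ≠ "" then true else past)

def deduplicate_leading_import_py (code : String) : String :=
  if code = "" then code
  else
    let lines := PySem.Str.splitlines code
    let st := lines.foldl pvStepA ([], PySem.Set.empty, false)
    PySem.Str.join "\n" st.1

-- ===== PORT B =====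
-- Phase 1 of Source B: index of the first line that is non-blank and not an import.
def pvFindBoundary : List String → Nat
  | [] => 0
  | l :: ls =>
    let s := PySem.Str.strip l
    if s ≠ "" ∧ ¬ PySem.Str.startswith s "import " then 0 else pvFindBoundary ls + 1

-- Phase 2 of Source B: deduplicate the leading block.
def pvStepB (st : List String × PySem.Set String) (line : String) :
    List String × PySem.Set String :=
  let out := st.1
  let seen := st.2
  let s := PySem.Str.strip line
  if PySem.Str.startswith s "import " then
    if PySem.Set.contains seen s then (out, seen)
    else (out ++ [line], PySem.Set.add seen s)
  else (out ++ [line], seen)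

def deduplicate_leading_import_py_alt (code : String) : String :=
  if code = "" then code
  else
    let lines := PySem.Str.splitlines code
    let b := pvFindBoundary lines
    let st := (lines.take b).foldl pvStepB ([], PySem.Set.empty)
    PySem.Str.join "\n" (st.1 ++ lines.drop b)

-- ===== PRECONDITION & SPEC =====
def Spec_deduplicate_leading_import_py (code : String) (out : String) : Prop := out = deduplicate_leading_import_py_alt code
instance (code : String) (out : String) : Decidable (Spec_deduplicate_leading_import_py code out) := by unfold Spec_deduplicate_leading_import_py; infer_instance

-- ===== CLAIM (what is proved, stated in full; the proofs are below) =====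
def Claim_equal_deduplicate_leading_import_py : Prop := ∀ (code : String), Dom_deduplicate_leading_import_py code → Spec_deduplicate_leading_import_py code (deduplicate_leading_import_py code)

-- ===== LEMMAS AND PROOFS =====

-- cons-style characterisation of A's loop output
def pvGA : List String → PySem.Set String → Bool → List String
  | [], _, _ => []
  | l :: ls, seen, past =>
    let s := PySem.Str.strip l
    if PySem.Str.startswith s "import " then
      if past then l :: pvGA ls seen past
      else if PySem.Set.contains seen s then pvGA ls seen past
      else l :: pvGA ls (PySem.Set.add seen s) past
    else
      l :: pvGA ls seen (if s ≠ "" then true else past)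

-- cons-style characterisation of B's dedup loop output
def pvHB : List String → PySem.Set String → List String
  | [], _ => []
  | l :: ls, seen =>
    let s := PySem.Str.strip l
    if PySem.Str.startswith s "import " then
      if PySem.Set.contains seen s then pvHB ls seen
      else l :: pvHB ls (PySem.Set.add seen s)
    else
      l :: pvHB ls seen

theorem pvFoldA (ls : List String) : ∀ kept seen past,
    (ls.foldl pvStepA (kept, seen, past)).1 = kept ++ pvGA ls seen past := by
  induction ls with
  | nil => intro kept seen past; simp [pvGA]
  | cons l ls ih =>
    intro kept seen past
    simp only [List.foldl, pvStepA, pvGA]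
    split_ifs <;> simp [ih]

theorem pvFoldB (ls : List String) : ∀ out seen,
    (ls.foldl pvStepB (out, seen)).1 = out ++ pvHB ls seen := by
  induction ls with
  | nil => intro out seen; simp [pvHB]
  | cons l ls ih =>
    intro out seen
    simp only [List.foldl, pvStepB, pvHB]
    split_ifs <;> simp [ih]

theorem pvGA_true (ls : List String) : ∀ seen, pvGA ls seen true = ls := by
  induction ls with
  | nil => intro seen; rfl
  | cons l ls ih =>
    intro seen
    simp only [pvGA]
    split_ifs <;> simp [ih]

theorem pvMain (ls : List String) : ∀ seen,
    pvGA ls seen false =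
      pvHB (ls.take (pvFindBoundary ls)) seen ++ ls.drop (pvFindBoundary ls) := by
  induction ls with
  | nil => intro seen; rfl
  | cons l ls ih =>
    intro seen
    simp only [pvGA, pvFindBoundary]
    by_cases himp : PySem.Str.startswith (PySem.Str.strip l) "import " = true
    · have hb : ¬(PySem.Str.strip l ≠ "" ∧ ¬PySem.Str.startswith (PySem.Str.strip l) "import " = true) :=
        fun h => h.2 himp
      rw [if_pos himp, if_neg hb, List.take_succ_cons, List.drop_succ_cons]
      simp only [pvHB]
      rw [if_pos himp]
      by_cases hseen : PySem.Set.contains seen (PySem.Str.strip l) = true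
      · rw [if_pos hseen, if_pos hseen]
        simp [ih]
      · rw [if_neg hseen, if_neg hseen]
        simp [ih]
    · by_cases hblank : PySem.Str.strip l = ""
      · have hb : ¬(PySem.Str.strip l ≠ "" ∧ ¬PySem.Str.startswith (PySem.Str.strip l) "import " = true) :=
          fun h => h.1 hblank
        rw [if_neg himp, if_neg hb, List.take_succ_cons, List.drop_succ_cons]
        simp only [pvHB]
        rw [if_neg himp, if_neg (not_not_intro hblank), ih]
        simp
      · have hb : PySem.Str.strip l ≠ "" ∧ ¬PySem.Str.startswith (PySem.Str.strip l) "import " = true :=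
          ⟨hblank, himp⟩
        rw [if_neg himp, if_pos hb, if_pos hblank, pvGA_true]
        simp [pvHB]

-- ===== VERDICT (by name: the statement is the Claim_ definition above) =====
theorem deduplicate_leading_import_py_spec : Claim_equal_deduplicate_leading_import_py := by
  intro code _
  unfold Spec_deduplicate_leading_import_py deduplicate_leading_import_py deduplicate_leading_import_py_alt
  by_cases h : code = ""
  · simp [h]
  · simp only [h, if_false, if_neg]
    rw [pvFoldA, pvFoldB, pvMain]
    simp
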